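-- pv_equiv track=rewrite | github.com/ankitabagaria8/Leetcode | smallest-index-with-equal-value/smallest-index-with-equal-value.py | smallestEqual
-- ===== SOURCE A (Python) =====
-- from typing import List
--
-- def smallestEqual(nums: List[int]) -> int:
--     x = []
--     y = []
--     for i in range(len(nums)):
--         if i%10 == nums[i]:
--             x.append(i)
--     if len(x) > 0:
--         y.append(min(x))
--         z = y[0]
--     else:
--         y.append(-1)
--         z = y[0]
--
--     return z
-- ===== SOURCE B (Python) =====
-- def smallestEqual(nums):
--     for i, v in enumerate(nums):
--         if i % 10 == v:
--             return i
--     return -1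
-- ===== Notes on version B (the rewrite author's own statement) =====
-- stated objective: simpler
-- what changed: A collects every matching index into a list and reduces it with min (plus a pointless singleton list y); B is a single enumerate loop that returns the first matching index immediately, with no intermediate lists.
import Mathlib
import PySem

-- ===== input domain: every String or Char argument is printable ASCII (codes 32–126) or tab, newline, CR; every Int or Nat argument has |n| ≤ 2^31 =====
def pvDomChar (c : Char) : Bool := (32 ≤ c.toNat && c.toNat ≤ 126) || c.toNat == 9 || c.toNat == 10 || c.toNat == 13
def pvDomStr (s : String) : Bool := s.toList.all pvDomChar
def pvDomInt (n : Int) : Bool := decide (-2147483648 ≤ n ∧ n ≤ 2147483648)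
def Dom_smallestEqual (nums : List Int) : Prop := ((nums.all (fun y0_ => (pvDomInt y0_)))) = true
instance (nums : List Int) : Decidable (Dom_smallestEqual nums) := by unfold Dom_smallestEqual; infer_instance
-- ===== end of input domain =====

-- B replaces A's collect-all-matches-then-min with a single early-return scan (objective: simpler).


-- ===== PORT A =====
-- nums[i] is ported as pyGetD nums i 0: i ∈ range(len(nums)) is always in range, so this is exact.
-- min(x) is guarded by len(x) > 0, so min? is always some there; .getD 0 is never the default.
def smallestEqual (nums : List Int) : Int :=
  let x : List Int := (PySem.List.pyRange 0 nums.length 1).foldl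
    (fun x i => if PySem.Int.mod i 10 == PySem.List.pyGetD nums i 0 then x ++ [i] else x) []
  let y : List Int := []
  if x.length > 0 then
    let y := y ++ [(PySem.List.min? x (fun v => v)).getD 0]
    PySem.List.pyGetD y 0 0
  else
    let y := y ++ [(-1 : Int)]
    PySem.List.pyGetD y 0 0

-- ===== PORT B =====
-- the 'for i, v in enumerate(nums): if i%10==v: return i' loop, as recursion over the enumerate list
def smallestEqualGo : List (Int × Int) → Int
  | [] => -1
  | (i, v) :: rest => if PySem.Int.mod i 10 == v then i else smallestEqualGo rest

def smallestEqual_alt (nums : List Int) : Int :=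
  smallestEqualGo (PySem.List.enumerate nums 0)

-- ===== PRECONDITION & SPEC =====
def Spec_smallestEqual (nums : List Int) (out : Int) : Prop := out = smallestEqual_alt nums
instance (nums : List Int) (out : Int) : Decidable (Spec_smallestEqual nums out) := by unfold Spec_smallestEqual; infer_instance

-- ===== CLAIM (what is proved, stated in full; the proofs are below) =====
def Claim_equal_smallestEqual : Prop := ∀ (nums : List Int), Dom_smallestEqual nums → Spec_smallestEqual nums (smallestEqual nums)

-- ===== LEMMAS AND PROOFS =====

-- B returns the head of the filtered match list (first match), -1 if none
theorem smallestEqualGo_eq (l : List (Int × Int)) :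
    smallestEqualGo l
      = (((l.filter (fun q => PySem.Int.mod q.1 10 == q.2)).map (fun q => q.1)).headD (-1)) := by
  induction l with
  | nil => rfl
  | cons q rest ih =>
    obtain ⟨i, v⟩ := q
    simp only [smallestEqualGo, List.filter_cons]
    cases h : (PySem.Int.mod i 10 == v) with
    | true => simp
    | false => simp only [Bool.false_eq_true, if_neg, not_false_eq_true]; exact ih

theorem foldl_min_of_lt (t : List Int) (m : Int) (h : ∀ y ∈ t, m ≤ y) :
    t.foldl min m = m := by
  induction t with
  | nil => rfl
  | cons y t ih =>
    have hm : min m y = m := min_eq_left (h y (by simp))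
    simp only [List.foldl, hm]
    exact ih (fun z hz => h z (by simp [hz]))

-- min of a strictly increasing nonempty list is its head
theorem min?_of_pairwise (x : List Int) (hx : x.Pairwise (· < ·)) (m : Int) (t : List Int)
    (he : x = m :: t) : (PySem.List.min? x (fun v => v)).getD 0 = m := by
  subst he
  rw [PySem.List.min?_id_cons]
  have : ∀ y ∈ t, m ≤ y := fun y hy => le_of_lt ((List.pairwise_cons.mp hx).1 y hy)
  simp [foldl_min_of_lt t m this]

theorem smallestEqual_spec : Claim_equal_smallestEqual := by
  intro nums _
  unfold Spec_smallestEqual smallestEqual smallestEqual_alt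
  rw [smallestEqualGo_eq]
  rw [PySem.List.enumerate_eq_map_pyRange nums 0]
  simp only [PySem.List.len_eq]
  rw [PySem.List.foldl_append_if_eq_filter]
  simp only [List.nil_append]
  set p : Int → Bool := fun i => PySem.Int.mod i 10 == PySem.List.pyGetD nums i 0 with hp
  have hfilter :
      ((PySem.List.pyRange 0 (nums.length : Int) 1).map
        (fun j => (j, PySem.List.pyGetD nums j 0))).filter
          (fun q => PySem.Int.mod q.1 10 == q.2)
        = ((PySem.List.pyRange 0 (nums.length : Int) 1).filter p).map
            (fun j => (j, PySem.List.pyGetD nums j 0)) := by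
    rw [List.filter_map]; rfl
  rw [hfilter, List.map_map]
  have hid : ((fun (q : Int × Int) => q.1) ∘ (fun j => (j, PySem.List.pyGetD nums j 0)))
      = (fun j => j) := rfl
  rw [hid, List.map_id']
  have hpw : ((PySem.List.pyRange 0 (nums.length : Int) 1).filter p).Pairwise (· < ·) :=
    (PySem.List.pairwise_lt_pyRange_one 0 (nums.length : Int)).filter p
  cases hxe : (PySem.List.pyRange 0 (nums.length : Int) 1).filter p with
  | nil =>
    simp [PySem.List.pyGetD, PySem.List.pyGet?, PySem.List.pyIdx?]
  | cons m t =>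
    have hmin := min?_of_pairwise _ (hxe ▸ hpw) m t rfl
    simp [hmin, PySem.List.pyGetD, PySem.List.pyGet?, PySem.List.pyIdx?]

-- ===== VERDICT (by name: the statement is the Claim_ definition above) =====
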